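-- pv_equiv track=rewrite | github.com/kovendhan5/ai-voice-agent | orpheus-voice-chat/src/app_real_ai.py | process_emotions
-- ===== SOURCE A (Python) =====
-- def process_emotions(text):
--     """Process emotion tags in text"""
--     # Remove emotion tags and replace with pauses/emphasis
--     emotion_map = {
--         "<laugh>": "haha! ",
--         "<chuckle>": "hehe, ",
--         "<sigh>": "*sigh* ",
--         "<gasp>": "oh! ",
--         "<whisper>": "",
--         "<excited>": "",
--         "<calm>": "",
--         "<happy>": "",
--         "<sad>": ""
--     }
--
--     for emotion, replacement in emotion_map.items():
--         text = text.replace(emotion, replacement)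
--
--     return text
-- ===== SOURCE B (Python) =====
-- def process_emotions(text):
--     """Process emotion tags in text"""
--     # Single left-to-right pass: at each position try the emotion tags in
--     # dict order; on a match emit the substitution and skip the tag.
--     emotion_map = {
--         "<laugh>": "haha! ",
--         "<chuckle>": "hehe, ",
--         "<sigh>": "*sigh* ",
--         "<gasp>": "oh! ",
--         "<whisper>": "",
--         "<excited>": "",
--         "<calm>": "",
--         "<happy>": "",
--         "<sad>": ""
--     }
--
--     out = []
--     i = 0
--     n = len(text)
--     while i < n:
--         for emotion, replacement in emotion_map.items():
--             if text.startswith(emotion, i):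
--                 out.append(replacement)
--                 i += len(emotion)
--                 break
--         else:
--             out.append(text[i])
--             i += 1
--     return "".join(out)
-- ===== Notes on version B (the rewrite author's own statement) =====
-- stated objective: alternative
-- what changed: Nine sequential full-string str.replace passes are replaced by one left-to-right scan that tries the emotion tags at each position and emits the substitution in place.
-- outside the precondition, e.g. on process_emotions('<sa<whisper>d>'): A returns '', B returns '<sad>'; on process_emotions('a<<b'): A returns 'a<<b', B returns 'a<<b'
import Mathlib
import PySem

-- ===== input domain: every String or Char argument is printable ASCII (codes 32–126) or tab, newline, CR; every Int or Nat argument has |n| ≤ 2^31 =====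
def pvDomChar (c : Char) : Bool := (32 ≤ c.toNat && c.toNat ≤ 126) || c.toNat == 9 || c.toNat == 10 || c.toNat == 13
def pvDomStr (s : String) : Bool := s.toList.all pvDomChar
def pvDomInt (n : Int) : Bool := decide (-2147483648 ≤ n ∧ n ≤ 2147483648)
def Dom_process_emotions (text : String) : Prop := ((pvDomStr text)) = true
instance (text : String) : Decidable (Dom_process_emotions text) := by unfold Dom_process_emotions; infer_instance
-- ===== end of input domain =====

-- B replaces A's nine sequential str.replace passes by one left-to-right scan over the
-- text (alternative algorithm of the same cost); equivalence is proved on Pre_ below.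

-- ===== PORT A =====
def process_emotions (text : String) : String :=
  let emotion_map : PySem.Dict String String := PySem.Dict.mk
    [("<laugh>", "haha! "), ("<chuckle>", "hehe, "), ("<sigh>", "*sigh* "),
     ("<gasp>", "oh! "), ("<whisper>", ""), ("<excited>", ""), ("<calm>", ""),
     ("<happy>", ""), ("<sad>", "")]
  emotion_map.items.foldl (fun t p => PySem.Str.replace t p.1 p.2) text

-- ===== PORT B =====
-- the (tag, replacement) pairs of Source B's emotion_map, in insertion order, as char lists
def pvTags : List (List Char × List Char) :=
  [("<laugh>".toList, "haha! ".toList), ("<chuckle>".toList, "hehe, ".toList),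
   ("<sigh>".toList, "*sigh* ".toList), ("<gasp>".toList, "oh! ".toList),
   ("<whisper>".toList, [] ), ("<excited>".toList, [] ), ("<calm>".toList, [] ),
   ("<happy>".toList, [] ), ("<sad>".toList, [] )]

-- Source B's inner 'for … if text.startswith(tag, i): … break / else': first tag matching at
-- the current position
def pvFindTag : List (List Char × List Char) → List Char → Option (List Char × List Char)
  | [], _ => none
  | (t, r) :: rest, s => if t.isPrefixOf s then some (t, r) else pvFindTag rest s

-- Source B's outer while loop: on a match emit the replacement and skip the tag
-- (i += len(tag): here 1 char consumed by the pattern match plus len-1 dropped),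
-- otherwise emit the character and advance by one
def pvScanT (ts : List (List Char × List Char)) (s : List Char) : List Char :=
  match s with
  | [] => []
  | c :: cs =>
    match pvFindTag ts (c :: cs) with
    | some (t, r) => r ++ pvScanT ts (cs.drop (t.length - 1))
    | none => c :: pvScanT ts cs
termination_by s.length
decreasing_by all_goals simp [List.length_drop]

def process_emotions_alt (text : String) : String :=
  String.ofList (pvScanT pvTags text.toList)

-- ===== PRECONDITION & SPEC =====
-- Pre_ excludes texts containing '<', then a proper prefix of a deletable tag's body,
-- then another '<': on such texts A's sequential empty replacements can splice the
-- surrounding characters into a new tag that a later pass of A also replaces, while a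
-- single scan leaves it (e.g. "<sa<whisper>d>": A "", B "<sad>") — an accidental corner
-- of A's pass order; the condition is a conservative closed form, so it also excludes
-- some texts (e.g. "a<<b") on which both sides agree.
def pvW : List (List Char) :=
  [[], ['w'], ['w','h'], ['w','h','i'], ['w','h','i','s'], ['w','h','i','s','p'],
   ['w','h','i','s','p','e'], ['w','h','i','s','p','e','r'],
   ['e'], ['e','x'], ['e','x','c'], ['e','x','c','i'], ['e','x','c','i','t'],
   ['e','x','c','i','t','e'], ['e','x','c','i','t','e','d'],
   ['c'], ['c','a'], ['c','a','l'], ['c','a','l','m'],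
   ['h'], ['h','a'], ['h','a','p'], ['h','a','p','p'], ['h','a','p','p','y'],
   ['s'], ['s','a'], ['s','a','d']]

def pvPatterns : List (List Char) := pvW.map (fun w => '<' :: (w ++ ['<']))

def Pre_process_emotions (text : String) : Prop :=
  ∀ p ∈ pvPatterns, ¬ p <:+: text.toList
instance (text : String) : Decidable (Pre_process_emotions text) := by
  unfold Pre_process_emotions; infer_instance

def pvWitness_process_emotions : String := "say <whisper>hi<laugh> a < b"

def Spec_process_emotions (text : String) (out : String) : Prop := out = process_emotions_alt text
instance (text : String) (out : String) : Decidable (Spec_process_emotions text out) := by unfold Spec_process_emotions; infer_instance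

-- ===== CLAIM (what is proved, stated in full; the proofs are below) =====
def Claim_equal_process_emotions : Prop := ∀ (text : String), Dom_process_emotions text → Pre_process_emotions text → Spec_process_emotions text (process_emotions text)

-- ===== LEMMAS AND PROOFS =====

-- small decidable facts about the literal tag/pattern tables
theorem pvPatterns_ne_nil : ∀ q ∈ pvPatterns, q ≠ [] := by decide

theorem pvPatterns_shape : ∀ q ∈ pvPatterns, ∃ w ∈ pvW, q = '<' :: (w ++ ['<']) := by
  intro q hq
  simp only [pvPatterns, List.mem_map] at hq
  obtain ⟨w, hw, rfl⟩ := hq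
  exact ⟨w, hw, rfl⟩

-- the family of strings whose proper prefixes all lie in pvW
def pvFam : List (List Char) :=
  (pvPatterns.map (fun q => q.drop 1)) ++
  [['w','h','i','s','p','e','r','>'], ['e','x','c','i','t','e','d','>'],
   ['c','a','l','m','>'], ['h','a','p','p','y','>'], ['s','a','d','>']]

theorem pvW_chars : ∀ w ∈ pvW, ' ' ∉ w ∧ '<' ∉ w := by decide

theorem pvFam_take : ∀ X ∈ pvFam, ∀ k ∈ List.range X.length, X.take k ∈ pvW := by decide


theorem pvListStrongInd {P : List Char → Prop} (s : List Char)
    (h : ∀ s : List Char, (∀ t : List Char, t.length < s.length → P t) → P s) : P s := by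
  have key : ∀ n (s : List Char), s.length ≤ n → P s := by
    intro n
    induction n with
    | zero => exact fun s hs => h s (fun t ht => absurd ht (by omega))
    | succ n ih => exact fun s hs => h s (fun t ht => ih t (by omega))
  exact key s.length s (le_refl _)

-- structural form of Python's str.replace for a nonempty pattern (PySem.Chars.replace
-- is fuel+accumulator based; pvRep_eq_replace below bridges the two)
def pvRep (p r : List Char) : List Char → List Char
  | [] => []
  | c :: cs =>
    if p.isPrefixOf (c :: cs) then r ++ pvRep p r (cs.drop (p.length - 1))
    else c :: pvRep p r cs
termination_by s => s.length
decreasing_by all_goals simp [List.length_drop]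

theorem pvRep_go_eq (p r : List Char) (hp : p ≠ []) :
    ∀ (fuel : Nat) (l acc : List Char), l.length ≤ fuel →
      PySem.Chars.replace.go p r fuel l acc = acc.reverse ++ pvRep p r l := by
  intro fuel
  induction fuel with
  | zero =>
    intro l acc h
    have hl : l = [] := List.eq_nil_of_length_eq_zero (Nat.le_zero.mp h)
    subst hl
    simp [PySem.Chars.replace.go, pvRep]
  | succ n ih =>
    intro l acc h
    match l with
    | [] => simp [PySem.Chars.replace.go, pvRep]
    | c :: t =>
      obtain ⟨m, hm⟩ : ∃ m, p.length = m + 1 :=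
        Nat.exists_eq_succ_of_ne_zero (by simpa using hp)
      by_cases hpre : p.isPrefixOf (c :: t)
      · have e1 : PySem.Chars.replace.go p r (n+1) (c :: t) acc =
            PySem.Chars.replace.go p r n (List.drop p.length (c :: t)) (r.reverse ++ acc) := by
          simp [PySem.Chars.replace.go, hpre]
        have hlen : (List.drop p.length (c :: t)).length ≤ n := by
          rw [hm, List.drop_succ_cons, List.length_drop]
          simp only [List.length_cons] at h
          omega
        rw [e1, ih _ _ hlen]
        have e2 : List.drop p.length (c :: t) = t.drop (p.length - 1) := by
          rw [hm]; simp
        rw [e2]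
        rw [show pvRep p r (c :: t) = r ++ pvRep p r (t.drop (p.length - 1)) from by
          rw [pvRep]; simp [hpre]]
        simp
      · have e1 : PySem.Chars.replace.go p r (n+1) (c :: t) acc =
            PySem.Chars.replace.go p r n t (c :: acc) := by
          simp [PySem.Chars.replace.go, hpre]
        have hlen : t.length ≤ n := by simpa using h
        rw [e1, ih _ _ hlen]
        rw [show pvRep p r (c :: t) = c :: pvRep p r t from by
          rw [pvRep]; simp [hpre]]
        simp

theorem pvRep_eq_replace (p r s : List Char) (hp : p ≠ []) :
    PySem.Chars.replace s p r = pvRep p r s := by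
  rw [PySem.Chars.replace]
  rw [if_neg (by simpa using hp)]
  rw [pvRep_go_eq p r hp s.length s [] (le_refl _)]
  simp


theorem pvRep_nil (p r : List Char) : pvRep p r [] = [] := by rw [pvRep]

theorem pvRep_cons_pos {p : List Char} (r : List Char) {c : Char} {cs : List Char}
    (h : p.isPrefixOf (c :: cs)) :
    pvRep p r (c :: cs) = r ++ pvRep p r (cs.drop (p.length - 1)) := by
  rw [pvRep, if_pos h]

theorem pvRep_cons_neg {p : List Char} (r : List Char) {c : Char} {cs : List Char}
    (h : ¬ p.isPrefixOf (c :: cs)) :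
    pvRep p r (c :: cs) = c :: pvRep p r cs := by
  rw [pvRep, if_neg h]

theorem pvScanT_nil (ts : List (List Char × List Char)) : pvScanT ts [] = [] := by rw [pvScanT]

theorem pvScanT_cons_none {ts : List (List Char × List Char)} {c : Char} {cs : List Char}
    (h : pvFindTag ts (c :: cs) = none) : pvScanT ts (c :: cs) = c :: pvScanT ts cs := by
  rw [pvScanT, h]

theorem pvScanT_cons_some {ts : List (List Char × List Char)} {c : Char} {cs q ru : List Char}
    (h : pvFindTag ts (c :: cs) = some (q, ru)) :
    pvScanT ts (c :: cs) = ru ++ pvScanT ts (cs.drop (q.length - 1)) := by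
  rw [pvScanT, h]

-- PatFree, the char-list form of Pre_
def pvPatFree (s : List Char) : Prop := ∀ p ∈ pvPatterns, ¬ p <:+: s

theorem pvPatFree_nil : pvPatFree [] := by
  intro q hq hinf
  exact pvPatterns_ne_nil q hq (List.eq_nil_of_infix_nil hinf)

theorem pvPatFree_suffix {s : List Char} (h : pvPatFree s) (n : Nat) : pvPatFree (s.drop n) := by
  intro q hq hinf
  exact h q hq (hinf.trans (List.drop_suffix n s).isInfix)

theorem pvPatFree_tail {c : Char} {cs : List Char} (h : pvPatFree (c :: cs)) : pvPatFree cs := by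
  have := pvPatFree_suffix h 1
  simpa using this

theorem pvPatFree_cons_iff {c : Char} {l : List Char} :
    pvPatFree (c :: l) ↔ (∀ p ∈ pvPatterns, ¬ p <+: (c :: l)) ∧ pvPatFree l := by
  constructor
  · intro h
    exact ⟨fun q hq hpre => h q hq hpre.isInfix, pvPatFree_tail h⟩
  · rintro ⟨h1, h2⟩ q hq hinf
    rcases List.infix_cons_iff.mp hinf with hpre | hinf'
    · exact h1 q hq hpre
    · exact h2 q hq hinf'

-- prefixes of an append decompose
theorem pv_prefix_append_cases {b r X : List Char} (h : b <+: r ++ X) :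
    b <+: r ∨ (r <+: b ∧ b.drop r.length <+: X) := by
  rcases (show b.length ≤ r.length ∨ r.length < b.length by omega) with hle | hlt
  · exact Or.inl ((List.isPrefix_append_of_length hle).mp h)
  · right
    have hrb : r <+: b :=
      List.prefix_of_prefix_length_le (List.prefix_append r X) h (le_of_lt hlt)
    refine ⟨hrb, ?_⟩
    obtain ⟨u, hu⟩ := h
    obtain ⟨v, hv⟩ := hrb
    have hvd : b.drop r.length = v := by rw [← hv, List.drop_left]
    rw [hvd]
    refine ⟨u, ?_⟩
    have : r ++ (v ++ u) = r ++ X := by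
      rw [← List.append_assoc, hv, hu]
    exact (List.append_cancel_left this)

-- obtain the explicit cons form of a list with head '<'
theorem pv_head_lt {p : List Char} (hp : p.head? = some '<') : p = '<' :: p.tail := by
  cases p with
  | nil => simp at hp
  | cons a t => simp at hp; simp [hp]

-- a block without '<' passes through pvRep untouched
theorem pvRep_append_of_not_lt {a : List Char} (p r : List Char)
    (hp : p.head? = some '<') (ha : '<' ∉ a) (b : List Char) :
    pvRep p r (a ++ b) = a ++ pvRep p r b := by
  induction a with
  | nil => rfl
  | cons x a' ih =>
    have hx : x ≠ '<' := fun hx => ha (hx ▸ List.mem_cons_self)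
    have hnp : ¬ p.isPrefixOf (x :: (a' ++ b)) := by
      intro hpre
      have := List.isPrefixOf_iff_prefix.mp hpre
      rw [pv_head_lt hp] at this
      exact hx (List.cons_prefix_cons.mp this).1.symm
    rw [List.cons_append, pvRep, if_neg hnp]
    rw [ih (fun hm => ha (List.mem_cons_of_mem _ hm))]
    rfl

theorem pvFindTag_none_of_head {ts : List (List Char × List Char)} {c : Char} {cs : List Char}
    (hts : ∀ u ∈ ts, u.1.head? = some '<') (hc : c ≠ '<') :
    pvFindTag ts (c :: cs) = none := by
  induction ts with
  | nil => rfl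
  | cons u rest ih =>
    obtain ⟨t, r⟩ := u
    have ht : t.head? = some '<' := hts (t, r) List.mem_cons_self
    have hnp : ¬ t.isPrefixOf (c :: cs) := by
      intro hpre
      have := List.isPrefixOf_iff_prefix.mp hpre
      rw [pv_head_lt ht] at this
      exact hc ((List.cons_prefix_cons.mp this).1.symm)
    rw [pvFindTag, if_neg hnp]
    exact ih (fun v hv => hts v (List.mem_cons_of_mem _ hv))

-- a block without '<' passes through the scan untouched
theorem pvScanT_append_of_not_lt {ts : List (List Char × List Char)} {a : List Char}
    (hts : ∀ u ∈ ts, u.1.head? = some '<') (ha : '<' ∉ a) (b : List Char) :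
    pvScanT ts (a ++ b) = a ++ pvScanT ts b := by
  induction a with
  | nil => rfl
  | cons x a' ih =>
    have hx : x ≠ '<' := fun hx => ha (hx ▸ List.mem_cons_self)
    rw [List.cons_append, pvScanT]
    rw [pvFindTag_none_of_head hts hx]
    rw [ih (fun hm => ha (List.mem_cons_of_mem _ hm))]
    rfl

theorem pvFindTag_congr {ts : List (List Char × List Char)} {s₁ s₂ : List Char}
    (h : ∀ u ∈ ts, (u.1 <+: s₁ ↔ u.1 <+: s₂)) : pvFindTag ts s₁ = pvFindTag ts s₂ := by
  induction ts with
  | nil => rfl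
  | cons u rest ih =>
    obtain ⟨t, r⟩ := u
    have hiff := h (t, r) List.mem_cons_self
    by_cases hpre : t <+: s₁
    · have h2 : t.isPrefixOf s₁ := List.isPrefixOf_iff_prefix.mpr hpre
      have h3 : t.isPrefixOf s₂ := List.isPrefixOf_iff_prefix.mpr (hiff.mp hpre)
      rw [pvFindTag, pvFindTag, if_pos h2, if_pos h3]
    · have h2 : ¬ t.isPrefixOf s₁ := fun hh => hpre (List.isPrefixOf_iff_prefix.mp hh)
      have h3 : ¬ t.isPrefixOf s₂ := fun hh => hpre (hiff.mpr (List.isPrefixOf_iff_prefix.mp hh))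
      rw [pvFindTag, pvFindTag, if_neg h2, if_neg h3]
      exact ih (fun v hv => h v (List.mem_cons_of_mem _ hv))

theorem pvFindTag_some {ts : List (List Char × List Char)} {s : List Char}
    {u : List Char × List Char} (h : pvFindTag ts s = some u) : u ∈ ts ∧ u.1 <+: s := by
  induction ts with
  | nil => simp [pvFindTag] at h
  | cons v rest ih =>
    obtain ⟨t, r⟩ := v
    rw [pvFindTag] at h
    by_cases hpre : t.isPrefixOf s
    · rw [if_pos hpre] at h
      obtain rfl : (t, r) = u := by simpa using h
      exact ⟨List.mem_cons_self, List.isPrefixOf_iff_prefix.mp hpre⟩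
    · rw [if_neg hpre] at h
      obtain ⟨h1, h2⟩ := ih h
      exact ⟨List.mem_cons_of_mem _ h1, h2⟩

-- backward transfer: a '<'-free block that is a prefix of s is still a prefix of pvRep p r s
theorem pvRep_prefix_back {p r : List Char} (hp : p.head? = some '<') :
    ∀ {s b : List Char}, b ≠ [] → '<' ∉ b → b <+: s → b <+: pvRep p r s := by
  intro s
  induction s using pvListStrongInd with
  | _ s ih =>
    intro b hb hlt hpre
    match s with
    | [] => exact absurd (List.prefix_nil.mp hpre) hb
    | c :: cs =>
      match b, hb with
      | b0 :: b', _ =>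
        obtain ⟨hb0, hb'⟩ := List.cons_prefix_cons.mp hpre
        by_cases hppre : p.isPrefixOf (c :: cs)
        · exfalso
          have := List.isPrefixOf_iff_prefix.mp hppre
          rw [pv_head_lt hp] at this
          have hc : c = '<' := ((List.cons_prefix_cons.mp this).1).symm
          exact hlt (by rw [hb0, hc]; exact List.mem_cons_self)
        · rw [pvRep_cons_neg r hppre]
          rcases eq_or_ne b' [] with rfl | hb'ne
          · exact List.cons_prefix_cons.mpr ⟨hb0, List.nil_prefix⟩
          · refine List.cons_prefix_cons.mpr ⟨hb0, ?_⟩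
            exact ih cs (by simp) hb'ne (fun hm => hlt (List.mem_cons_of_mem _ hm)) hb'

theorem pv_getLast?_tail {b : List Char} {c cl : Char} (hb : b ≠ [])
    (h : (c :: b).getLast? = some cl) : b.getLast? = some cl := by
  rw [List.getLast?_cons] at h
  rcases hbl : b.getLast? with _ | x
  · simp [List.getLast?_eq_none_iff.mp hbl] at hb
  · rw [hbl] at h; simpa using h

-- forward transfer for a nonempty replacement, by character facts
theorem pvRep_prefix_fwd {p r : List Char} (hr : ' ' ∈ r) :
    ∀ {s b : List Char} {cl : Char}, b.getLast? = some cl → cl ∉ r → ' ' ∉ b →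
      b <+: pvRep p r s → b <+: s := by
  intro s
  induction s using pvListStrongInd with
  | _ s ih =>
    intro b cl hlast hclr hsp hpre
    match s with
    | [] =>
      rw [show pvRep p r [] = [] from by rw [pvRep]] at hpre
      have := List.prefix_nil.mp hpre
      subst this; simp at hlast
    | c :: cs =>
      by_cases hppre : p.isPrefixOf (c :: cs)
      · exfalso
        rw [pvRep_cons_pos r hppre] at hpre
        rcases pv_prefix_append_cases hpre with hbr | ⟨hrb, _⟩
        · exact hclr (hbr.subset (List.mem_of_getLast? hlast))
        · exact hsp (hrb.subset hr)
      · rw [pvRep_cons_neg r hppre] at hpre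
        match b, hlast with
        | b0 :: b', hl2 =>
          obtain ⟨hb0, hb'⟩ := List.cons_prefix_cons.mp hpre
          rcases eq_or_ne b' [] with rfl | hb'ne
          · exact List.cons_prefix_cons.mpr ⟨hb0, List.nil_prefix⟩
          · have hlast' : b'.getLast? = some cl := pv_getLast?_tail hb'ne hl2
            have hb'pre : b' <+: cs :=
              ih cs (by simp) hlast' hclr (fun hm => hsp (List.mem_cons_of_mem _ hm)) hb'
            exact List.cons_prefix_cons.mpr ⟨hb0, hb'pre⟩

-- forward transfer for a deletion pass, by pattern exclusion
theorem pvRep_prefix_fwd_del {p r : List Char} (hp : p.head? = some '<') :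
    ∀ {s : List Char} {X : List Char} {k : Nat}, X ∈ pvFam → k < X.length →
      (∀ q ∈ pvPatterns, ¬ q <:+: ('<' :: (X.take k ++ s))) →
      X.drop k <+: pvRep p r s → X.drop k <+: s := by
  intro s
  induction s using pvListStrongInd with
  | _ s ih =>
    intro X k hX hk hno hpre
    have hbne : X.drop k ≠ [] := by
      simp only [ne_eq, List.drop_eq_nil_iff]
      omega
    match s with
    | [] =>
      rw [show pvRep p r [] = [] from by rw [pvRep]] at hpre
      exact absurd (List.prefix_nil.mp hpre) hbne
    | c :: cs =>
      by_cases hppre : p.isPrefixOf (c :: cs)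
      · exfalso
        -- here the original text contains the pattern '<' ++ X.take k ++ ['<']
        have hq : ('<' :: (X.take k ++ ['<'])) ∈ pvPatterns := by
          have hw : X.take k ∈ pvW :=
            pvFam_take X hX k (List.mem_range.mpr hk)
          simp only [pvPatterns, List.mem_map]
          exact ⟨X.take k, hw, rfl⟩
        have hc : c = '<' := by
          have := List.isPrefixOf_iff_prefix.mp hppre
          rw [pv_head_lt hp] at this
          exact ((List.cons_prefix_cons.mp this).1).symm
        have hinf : ('<' :: (X.take k ++ ['<'])) <:+: ('<' :: (X.take k ++ (c :: cs))) := by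
          apply List.IsPrefix.isInfix
          refine List.cons_prefix_cons.mpr ⟨rfl, ?_⟩
          refine (List.prefix_append_right_inj (X.take k)).mpr ?_
          rw [hc]
          exact ⟨cs, rfl⟩
        exact hno _ hq hinf
      · rw [pvRep_cons_neg r hppre] at hpre
        obtain ⟨b', hb'⟩ : ∃ b', X.drop k = c :: b' := by
          match hX2 : X.drop k, hbne with
          | b0 :: b', _ =>
            have : b0 = c := (List.cons_prefix_cons.mp (hX2 ▸ hpre)).1
            exact ⟨b', by rw [this]⟩
        have hXk : X[k]? = some c := by
          have h0 : (X.drop k)[0]? = some c := by rw [hb']; rfl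
          simpa [List.getElem?_drop] using h0
        have hb'eq : X.drop (k+1) = b' := by
          have h1 := congrArg (fun l => List.drop 1 l) hb'
          simp only [List.drop_drop] at h1
          simpa using h1
        have hpre' : b' <+: pvRep p r cs := by
          rw [hb'] at hpre
          exact (List.cons_prefix_cons.mp hpre).2
        rcases eq_or_ne b' [] with rfl | hb'ne
        · rw [hb']
          exact List.cons_prefix_cons.mpr ⟨rfl, List.nil_prefix⟩
        · have hk1 : k + 1 < X.length := by
            by_contra hge
            exact hb'ne (by rw [← hb'eq]; simp; omega)
          have htake : X.take (k+1) = X.take k ++ [c] := by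
            rw [List.take_add_one, hXk]
            simp
          have hno' : ∀ q ∈ pvPatterns, ¬ q <:+: ('<' :: (X.take (k+1) ++ cs)) := by
            intro q hq hinf
            refine hno q hq ?_
            rw [htake] at hinf
            simpa using hinf
          have := ih cs (by simp) hX hk1 hno' (hb'eq ▸ hpre')
          rw [hb', ← hb'eq]
          exact List.cons_prefix_cons.mpr ⟨rfl, hb'eq ▸ this⟩

-- pattern-freeness is preserved by a pass, char-fact version and deletion version combined
theorem pvPatFree_append_left {a b : List Char} (ha : '<' ∉ a) (hb : pvPatFree b) :
    pvPatFree (a ++ b) := by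
  induction a with
  | nil => simpa using hb
  | cons x a' ih =>
    have hx : x ≠ '<' := fun hx => ha (hx ▸ List.mem_cons_self)
    rw [List.cons_append]
    rw [pvPatFree_cons_iff]
    refine ⟨?_, ih (fun hm => ha (List.mem_cons_of_mem _ hm))⟩
    intro q hq hpre
    obtain ⟨w, _, rfl⟩ := pvPatterns_shape q hq
    exact hx ((List.cons_prefix_cons.mp hpre).1).symm

theorem pvPatFree_rep_gen (p r : List Char) (hp0 : p.head? = some '<')
    (hcase : (' ' ∈ r ∧ '>' ∉ r ∧ '<' ∉ r) ∨ r = []) :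
    ∀ {s : List Char}, pvPatFree s → pvPatFree (pvRep p r s) := by
  intro s
  induction s using pvListStrongInd with
  | _ s ih =>
    intro hs
    match s with
    | [] =>
      rw [show pvRep p r [] = [] from by rw [pvRep]]
      exact pvPatFree_nil
    | c :: cs =>
      by_cases hppre : p.isPrefixOf (c :: cs)
      · rw [pvRep_cons_pos r hppre]
        have hrlt : '<' ∉ r := by
          rcases hcase with ⟨_, _, h⟩ | rfl
          · exact h
          · simp
        refine pvPatFree_append_left hrlt ?_
        exact ih _ (by simp [List.length_drop]) (pvPatFree_suffix (pvPatFree_tail hs) _)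
      · rw [pvRep_cons_neg r hppre]
        rw [pvPatFree_cons_iff]
        refine ⟨?_, ih cs (by simp) (pvPatFree_tail hs)⟩
        intro q hq hpre
        obtain ⟨w, hw, rfl⟩ := pvPatterns_shape q hq
        obtain ⟨hc, hqt⟩ := List.cons_prefix_cons.mp hpre
        subst hc
        have hWsp : ' ' ∉ w ∧ '<' ∉ w := pvW_chars w hw
        have htail : (w ++ ['<']) <+: cs := by
          rcases hcase with ⟨hr1, hr2, hr3⟩ | rfl
          · refine pvRep_prefix_fwd hr1 List.getLast?_concat hr3 ?_ hqt
            intro hm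
            rcases List.mem_append.mp hm with hm | hm
            · exact hWsp.1 hm
            · simp at hm
          · have hXf : (w ++ ['<']) ∈ pvFam := by
              simp only [pvFam, List.mem_append, List.mem_map]
              refine Or.inl ⟨'<' :: (w ++ ['<']), ?_, by simp⟩
              simp only [pvPatterns, List.mem_map]
              exact ⟨w, hw, rfl⟩
            have h0 : (0 : Nat) < (w ++ ['<']).length := by simp
            have hno : ∀ q' ∈ pvPatterns, ¬ q' <:+: ('<' :: ((w ++ ['<']).take 0 ++ cs)) := by
              intro q' hq' hinf
              exact hs q' hq' (by simpa using hinf)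
            have := pvRep_prefix_fwd_del hp0 hXf h0 hno (by simpa using hqt)
            simpa using this
        refine hs ('<' :: (w ++ ['<'])) hq ?_
        exact (List.cons_prefix_cons.mpr ⟨rfl, htail⟩).isInfix

-- one pass of A folded into the scan
theorem pvStep (p r : List Char) (ts : List (List Char × List Char))
    (hp0 : p.head? = some '<') (hr : '<' ∉ r)
    (hts : ∀ u ∈ ts, u.1 ≠ [] ∧ u.1.head? = some '<' ∧ '<' ∉ u.1.drop 1)
    (hform : ∀ u ∈ ts, ∀ z : List Char,
      (∀ q ∈ pvPatterns, ¬ q <:+: ('<' :: z)) →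
      ((u.1.drop 1) <+: pvRep p r z ↔ (u.1.drop 1) <+: z)) :
    ∀ s : List Char, pvPatFree s →
      pvScanT ts (pvRep p r s) = pvScanT ((p, r) :: ts) s := by
  intro s
  induction s using pvListStrongInd with
  | _ s ih =>
    intro hs
    match s with
    | [] => rw [pvRep_nil, pvScanT_nil, pvScanT_nil]
    | c :: cs =>
      by_cases hppre : p.isPrefixOf (c :: cs)
      · rw [pvRep_cons_pos r hppre]
        rw [pvScanT_append_of_not_lt (fun u hu => (hts u hu).2.1) hr]
        rw [ih _ (by simp [List.length_drop]) (pvPatFree_suffix (pvPatFree_tail hs) _)]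
        have hfind : pvFindTag ((p, r) :: ts) (c :: cs) = some (p, r) := by
          rw [pvFindTag, if_pos hppre]
        rw [pvScanT_cons_some hfind]
      · rw [pvRep_cons_neg r hppre]
        have hfcons : pvFindTag ((p, r) :: ts) (c :: cs) = pvFindTag ts (c :: cs) := by
          rw [pvFindTag]; simp [hppre]
        by_cases hc : c = '<'
        · subst hc
          have hcongr : pvFindTag ts ('<' :: pvRep p r cs) = pvFindTag ts ('<' :: cs) := by
            apply pvFindTag_congr
            intro u hu
            obtain ⟨hne, hhd, hlt⟩ := hts u hu
            rw [pv_head_lt hhd, ← List.drop_one]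
            rw [List.cons_prefix_cons, List.cons_prefix_cons]
            have := hform u hu cs (fun q hq hinf => hs q hq hinf)
            constructor
            · rintro ⟨-, h2⟩; exact ⟨rfl, this.mp h2⟩
            · rintro ⟨-, h2⟩; exact ⟨rfl, this.mpr h2⟩
          match hft : pvFindTag ts ('<' :: cs) with
          | none =>
            rw [pvScanT_cons_none (hcongr.trans hft)]
            rw [pvScanT_cons_none (hfcons.trans hft)]
            rw [ih cs (by simp) (pvPatFree_tail hs)]
          | some (q, ru) =>
            obtain ⟨hmem, hqpre⟩ := pvFindTag_some hft
            obtain ⟨hne, hhd, hlt⟩ := hts (q, ru) hmem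
            have hq : q = '<' :: q.tail := pv_head_lt hhd
            have hbq : q.tail <+: cs := by
              rw [hq] at hqpre
              exact (List.cons_prefix_cons.mp hqpre).2
            obtain ⟨rest, hrest⟩ := hbq
            have hsplit : pvRep p r cs = q.tail ++ pvRep p r rest := by
              rw [← hrest]
              exact pvRep_append_of_not_lt p r hp0 (by rwa [← List.drop_one]) rest
            have hqlen : q.length - 1 = q.tail.length := by
              rw [hq]; simp
            rw [pvScanT_cons_some (hcongr.trans hft)]
            rw [pvScanT_cons_some (hfcons.trans hft)]
            have hdrop1 : (pvRep p r cs).drop (q.length - 1) = pvRep p r rest := by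
              rw [hsplit, hqlen, List.drop_left]
            have hdrop2 : cs.drop (q.length - 1) = rest := by
              rw [← hrest, hqlen, List.drop_left]
            rw [hdrop1, hdrop2]
            have hrest_pf : pvPatFree rest := by
              have : rest = cs.drop q.tail.length := by rw [← hrest, List.drop_left]
              rw [this]
              exact pvPatFree_suffix (pvPatFree_tail hs) _
            rw [ih rest (by
              have : rest.length ≤ cs.length := by
                rw [← hrest]; simp
              simp; omega) hrest_pf]
        · have hfn1 : pvFindTag ts (c :: pvRep p r cs) = none :=
            pvFindTag_none_of_head (fun u hu => (hts u hu).2.1) hc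
          have hfn2 : pvFindTag ts (c :: cs) = none :=
            pvFindTag_none_of_head (fun u hu => (hts u hu).2.1) hc
          rw [pvScanT_cons_none hfn1]
          rw [pvScanT_cons_none (hfcons.trans hfn2)]
          rw [ih cs (by simp) (pvPatFree_tail hs)]

-- the per-tag transfer hypothesis of pvStep, assembled from the two transfer lemmas
theorem pvHform (p r : List Char) (hp0 : p.head? = some '<')
    (hcase : (' ' ∈ r ∧ '>' ∉ r ∧ '<' ∉ r) ∨ r = [])
    (u : List Char × List Char)
    (hu : (u.1.drop 1).getLast? = some '>' ∧ '<' ∉ u.1.drop 1 ∧ ' ' ∉ u.1.drop 1 ∧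
      u.1.drop 1 ≠ [] ∧ (r = [] → u.1.drop 1 ∈ pvFam)) :
    ∀ z : List Char, (∀ q ∈ pvPatterns, ¬ q <:+: ('<' :: z)) →
      ((u.1.drop 1) <+: pvRep p r z ↔ (u.1.drop 1) <+: z) := by
  intro z hz
  obtain ⟨hgl, hlt, hsp, hne, hfam⟩ := hu
  constructor
  · intro hpre
    rcases hcase with ⟨hr1, hr2, hr3⟩ | hrnil
    · exact pvRep_prefix_fwd hr1 hgl hr2 hsp hpre
    · subst hrnil
      have hX : u.1.drop 1 ∈ pvFam := hfam rfl
      have h0 : 0 < (u.1.drop 1).length := List.length_pos_of_ne_nil hne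
      have := pvRep_prefix_fwd_del hp0 (k := 0) hX h0 (by simpa using hz) (by simpa using hpre)
      simpa using this
  · intro hpre
    exact pvRep_prefix_back hp0 hne hlt hpre

theorem pvScanT_no_tags : ∀ z : List Char, pvScanT [] z = z := by
  intro z
  induction z using pvListStrongInd with
  | _ z ih =>
    match z with
    | [] => rw [pvScanT_nil]
    | c :: cs => rw [pvScanT_cons_none rfl, ih cs (by simp)]

theorem pvBundle0 : ∀ u ∈ ([("<chuckle>".toList, "hehe, ".toList), ("<sigh>".toList, "*sigh* ".toList), ("<gasp>".toList, "oh! ".toList), ("<whisper>".toList, ([] : List Char)), ("<excited>".toList, ([] : List Char)), ("<calm>".toList, ([] : List Char)), ("<happy>".toList, ([] : List Char)), ("<sad>".toList, ([] : List Char))] : List (List Char × List Char)),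
    (u.1.drop 1).getLast? = some '>' ∧ '<' ∉ u.1.drop 1 ∧ ' ' ∉ u.1.drop 1 ∧
      u.1.drop 1 ≠ [] ∧ ("haha! ".toList = [] → u.1.drop 1 ∈ pvFam) := by decide

theorem pvBundle1 : ∀ u ∈ ([("<sigh>".toList, "*sigh* ".toList), ("<gasp>".toList, "oh! ".toList), ("<whisper>".toList, ([] : List Char)), ("<excited>".toList, ([] : List Char)), ("<calm>".toList, ([] : List Char)), ("<happy>".toList, ([] : List Char)), ("<sad>".toList, ([] : List Char))] : List (List Char × List Char)),
    (u.1.drop 1).getLast? = some '>' ∧ '<' ∉ u.1.drop 1 ∧ ' ' ∉ u.1.drop 1 ∧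
      u.1.drop 1 ≠ [] ∧ ("hehe, ".toList = [] → u.1.drop 1 ∈ pvFam) := by decide

theorem pvBundle2 : ∀ u ∈ ([("<gasp>".toList, "oh! ".toList), ("<whisper>".toList, ([] : List Char)), ("<excited>".toList, ([] : List Char)), ("<calm>".toList, ([] : List Char)), ("<happy>".toList, ([] : List Char)), ("<sad>".toList, ([] : List Char))] : List (List Char × List Char)),
    (u.1.drop 1).getLast? = some '>' ∧ '<' ∉ u.1.drop 1 ∧ ' ' ∉ u.1.drop 1 ∧
      u.1.drop 1 ≠ [] ∧ ("*sigh* ".toList = [] → u.1.drop 1 ∈ pvFam) := by decide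

theorem pvBundle3 : ∀ u ∈ ([("<whisper>".toList, ([] : List Char)), ("<excited>".toList, ([] : List Char)), ("<calm>".toList, ([] : List Char)), ("<happy>".toList, ([] : List Char)), ("<sad>".toList, ([] : List Char))] : List (List Char × List Char)),
    (u.1.drop 1).getLast? = some '>' ∧ '<' ∉ u.1.drop 1 ∧ ' ' ∉ u.1.drop 1 ∧
      u.1.drop 1 ≠ [] ∧ ("oh! ".toList = [] → u.1.drop 1 ∈ pvFam) := by decide

theorem pvBundle4 : ∀ u ∈ ([("<excited>".toList, ([] : List Char)), ("<calm>".toList, ([] : List Char)), ("<happy>".toList, ([] : List Char)), ("<sad>".toList, ([] : List Char))] : List (List Char × List Char)),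
    (u.1.drop 1).getLast? = some '>' ∧ '<' ∉ u.1.drop 1 ∧ ' ' ∉ u.1.drop 1 ∧
      u.1.drop 1 ≠ [] ∧ (([] : List Char) = [] → u.1.drop 1 ∈ pvFam) := by decide

theorem pvBundle5 : ∀ u ∈ ([("<calm>".toList, ([] : List Char)), ("<happy>".toList, ([] : List Char)), ("<sad>".toList, ([] : List Char))] : List (List Char × List Char)),
    (u.1.drop 1).getLast? = some '>' ∧ '<' ∉ u.1.drop 1 ∧ ' ' ∉ u.1.drop 1 ∧
      u.1.drop 1 ≠ [] ∧ (([] : List Char) = [] → u.1.drop 1 ∈ pvFam) := by decide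

theorem pvBundle6 : ∀ u ∈ ([("<happy>".toList, ([] : List Char)), ("<sad>".toList, ([] : List Char))] : List (List Char × List Char)),
    (u.1.drop 1).getLast? = some '>' ∧ '<' ∉ u.1.drop 1 ∧ ' ' ∉ u.1.drop 1 ∧
      u.1.drop 1 ≠ [] ∧ (([] : List Char) = [] → u.1.drop 1 ∈ pvFam) := by decide

theorem pvBundle7 : ∀ u ∈ ([("<sad>".toList, ([] : List Char))] : List (List Char × List Char)),
    (u.1.drop 1).getLast? = some '>' ∧ '<' ∉ u.1.drop 1 ∧ ' ' ∉ u.1.drop 1 ∧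
      u.1.drop 1 ≠ [] ∧ (([] : List Char) = [] → u.1.drop 1 ∈ pvFam) := by decide

theorem pvBundle8 : ∀ u ∈ ([] : List (List Char × List Char)),
    (u.1.drop 1).getLast? = some '>' ∧ '<' ∉ u.1.drop 1 ∧ ' ' ∉ u.1.drop 1 ∧
      u.1.drop 1 ≠ [] ∧ (([] : List Char) = [] → u.1.drop 1 ∈ pvFam) := by decide

theorem pvMain (s : List Char) (h : pvPatFree s) :
    pvTags.foldl (fun acc u => pvRep u.1 u.2 acc) s = pvScanT pvTags s := by
  simp only [pvTags, List.foldl_cons, List.foldl_nil]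
  have hpf0 : pvPatFree s := h
  have hstep0 := pvStep "<laugh>".toList "haha! ".toList ([("<chuckle>".toList, "hehe, ".toList), ("<sigh>".toList, "*sigh* ".toList), ("<gasp>".toList, "oh! ".toList), ("<whisper>".toList, ([] : List Char)), ("<excited>".toList, ([] : List Char)), ("<calm>".toList, ([] : List Char)), ("<happy>".toList, ([] : List Char)), ("<sad>".toList, ([] : List Char))] : List (List Char × List Char)) (by decide) (by decide) (by decide)
    (fun u hu => pvHform _ _ (by decide) (by decide) u (pvBundle0 u hu)) (s) hpf0
  rw [← hstep0]
  have hpf1 : pvPatFree (pvRep "<laugh>".toList "haha! ".toList (s)) := pvPatFree_rep_gen _ _ (by decide) (by decide) hpf0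
  have hstep1 := pvStep "<chuckle>".toList "hehe, ".toList ([("<sigh>".toList, "*sigh* ".toList), ("<gasp>".toList, "oh! ".toList), ("<whisper>".toList, ([] : List Char)), ("<excited>".toList, ([] : List Char)), ("<calm>".toList, ([] : List Char)), ("<happy>".toList, ([] : List Char)), ("<sad>".toList, ([] : List Char))] : List (List Char × List Char)) (by decide) (by decide) (by decide)
    (fun u hu => pvHform _ _ (by decide) (by decide) u (pvBundle1 u hu)) (pvRep "<laugh>".toList "haha! ".toList (s)) hpf1
  rw [← hstep1]
  have hpf2 : pvPatFree (pvRep "<chuckle>".toList "hehe, ".toList (pvRep "<laugh>".toList "haha! ".toList (s))) := pvPatFree_rep_gen _ _ (by decide) (by decide) hpf1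
  have hstep2 := pvStep "<sigh>".toList "*sigh* ".toList ([("<gasp>".toList, "oh! ".toList), ("<whisper>".toList, ([] : List Char)), ("<excited>".toList, ([] : List Char)), ("<calm>".toList, ([] : List Char)), ("<happy>".toList, ([] : List Char)), ("<sad>".toList, ([] : List Char))] : List (List Char × List Char)) (by decide) (by decide) (by decide)
    (fun u hu => pvHform _ _ (by decide) (by decide) u (pvBundle2 u hu)) (pvRep "<chuckle>".toList "hehe, ".toList (pvRep "<laugh>".toList "haha! ".toList (s))) hpf2
  rw [← hstep2]
  have hpf3 : pvPatFree (pvRep "<sigh>".toList "*sigh* ".toList (pvRep "<chuckle>".toList "hehe, ".toList (pvRep "<laugh>".toList "haha! ".toList (s)))) := pvPatFree_rep_gen _ _ (by decide) (by decide) hpf2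
  have hstep3 := pvStep "<gasp>".toList "oh! ".toList ([("<whisper>".toList, ([] : List Char)), ("<excited>".toList, ([] : List Char)), ("<calm>".toList, ([] : List Char)), ("<happy>".toList, ([] : List Char)), ("<sad>".toList, ([] : List Char))] : List (List Char × List Char)) (by decide) (by decide) (by decide)
    (fun u hu => pvHform _ _ (by decide) (by decide) u (pvBundle3 u hu)) (pvRep "<sigh>".toList "*sigh* ".toList (pvRep "<chuckle>".toList "hehe, ".toList (pvRep "<laugh>".toList "haha! ".toList (s)))) hpf3
  rw [← hstep3]
  have hpf4 : pvPatFree (pvRep "<gasp>".toList "oh! ".toList (pvRep "<sigh>".toList "*sigh* ".toList (pvRep "<chuckle>".toList "hehe, ".toList (pvRep "<laugh>".toList "haha! ".toList (s))))) := pvPatFree_rep_gen _ _ (by decide) (by decide) hpf3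
  have hstep4 := pvStep "<whisper>".toList ([] : List Char) ([("<excited>".toList, ([] : List Char)), ("<calm>".toList, ([] : List Char)), ("<happy>".toList, ([] : List Char)), ("<sad>".toList, ([] : List Char))] : List (List Char × List Char)) (by decide) (by decide) (by decide)
    (fun u hu => pvHform _ _ (by decide) (by decide) u (pvBundle4 u hu)) (pvRep "<gasp>".toList "oh! ".toList (pvRep "<sigh>".toList "*sigh* ".toList (pvRep "<chuckle>".toList "hehe, ".toList (pvRep "<laugh>".toList "haha! ".toList (s))))) hpf4
  rw [← hstep4]
  have hpf5 : pvPatFree (pvRep "<whisper>".toList ([] : List Char) (pvRep "<gasp>".toList "oh! ".toList (pvRep "<sigh>".toList "*sigh* ".toList (pvRep "<chuckle>".toList "hehe, ".toList (pvRep "<laugh>".toList "haha! ".toList (s)))))) := pvPatFree_rep_gen _ _ (by decide) (by decide) hpf4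
  have hstep5 := pvStep "<excited>".toList ([] : List Char) ([("<calm>".toList, ([] : List Char)), ("<happy>".toList, ([] : List Char)), ("<sad>".toList, ([] : List Char))] : List (List Char × List Char)) (by decide) (by decide) (by decide)
    (fun u hu => pvHform _ _ (by decide) (by decide) u (pvBundle5 u hu)) (pvRep "<whisper>".toList ([] : List Char) (pvRep "<gasp>".toList "oh! ".toList (pvRep "<sigh>".toList "*sigh* ".toList (pvRep "<chuckle>".toList "hehe, ".toList (pvRep "<laugh>".toList "haha! ".toList (s)))))) hpf5
  rw [← hstep5]
  have hpf6 : pvPatFree (pvRep "<excited>".toList ([] : List Char) (pvRep "<whisper>".toList ([] : List Char) (pvRep "<gasp>".toList "oh! ".toList (pvRep "<sigh>".toList "*sigh* ".toList (pvRep "<chuckle>".toList "hehe, ".toList (pvRep "<laugh>".toList "haha! ".toList (s))))))) := pvPatFree_rep_gen _ _ (by decide) (by decide) hpf5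
  have hstep6 := pvStep "<calm>".toList ([] : List Char) ([("<happy>".toList, ([] : List Char)), ("<sad>".toList, ([] : List Char))] : List (List Char × List Char)) (by decide) (by decide) (by decide)
    (fun u hu => pvHform _ _ (by decide) (by decide) u (pvBundle6 u hu)) (pvRep "<excited>".toList ([] : List Char) (pvRep "<whisper>".toList ([] : List Char) (pvRep "<gasp>".toList "oh! ".toList (pvRep "<sigh>".toList "*sigh* ".toList (pvRep "<chuckle>".toList "hehe, ".toList (pvRep "<laugh>".toList "haha! ".toList (s))))))) hpf6
  rw [← hstep6]
  have hpf7 : pvPatFree (pvRep "<calm>".toList ([] : List Char) (pvRep "<excited>".toList ([] : List Char) (pvRep "<whisper>".toList ([] : List Char) (pvRep "<gasp>".toList "oh! ".toList (pvRep "<sigh>".toList "*sigh* ".toList (pvRep "<chuckle>".toList "hehe, ".toList (pvRep "<laugh>".toList "haha! ".toList (s)))))))) := pvPatFree_rep_gen _ _ (by decide) (by decide) hpf6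
  have hstep7 := pvStep "<happy>".toList ([] : List Char) ([("<sad>".toList, ([] : List Char))] : List (List Char × List Char)) (by decide) (by decide) (by decide)
    (fun u hu => pvHform _ _ (by decide) (by decide) u (pvBundle7 u hu)) (pvRep "<calm>".toList ([] : List Char) (pvRep "<excited>".toList ([] : List Char) (pvRep "<whisper>".toList ([] : List Char) (pvRep "<gasp>".toList "oh! ".toList (pvRep "<sigh>".toList "*sigh* ".toList (pvRep "<chuckle>".toList "hehe, ".toList (pvRep "<laugh>".toList "haha! ".toList (s)))))))) hpf7
  rw [← hstep7]
  have hpf8 : pvPatFree (pvRep "<happy>".toList ([] : List Char) (pvRep "<calm>".toList ([] : List Char) (pvRep "<excited>".toList ([] : List Char) (pvRep "<whisper>".toList ([] : List Char) (pvRep "<gasp>".toList "oh! ".toList (pvRep "<sigh>".toList "*sigh* ".toList (pvRep "<chuckle>".toList "hehe, ".toList (pvRep "<laugh>".toList "haha! ".toList (s))))))))) := pvPatFree_rep_gen _ _ (by decide) (by decide) hpf7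
  have hstep8 := pvStep "<sad>".toList ([] : List Char) ([] : List (List Char × List Char)) (by decide) (by decide) (by decide)
    (fun u hu => pvHform _ _ (by decide) (by decide) u (pvBundle8 u hu)) (pvRep "<happy>".toList ([] : List Char) (pvRep "<calm>".toList ([] : List Char) (pvRep "<excited>".toList ([] : List Char) (pvRep "<whisper>".toList ([] : List Char) (pvRep "<gasp>".toList "oh! ".toList (pvRep "<sigh>".toList "*sigh* ".toList (pvRep "<chuckle>".toList "hehe, ".toList (pvRep "<laugh>".toList "haha! ".toList (s))))))))) hpf8
  rw [← hstep8]
  rw [pvScanT_no_tags]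

-- A's fold over the dict items, moved to the character level
theorem pvChain_toList : ∀ (ps : List (String × String)), (∀ q ∈ ps, q.1.toList ≠ []) →
    ∀ t : String, (ps.foldl (fun acc p => PySem.Str.replace acc p.1 p.2) t).toList =
      (ps.map (fun q => (q.1.toList, q.2.toList))).foldl (fun acc u => pvRep u.1 u.2 acc) t.toList := by
  intro ps
  induction ps with
  | nil => intro _ t; rfl
  | cons q qs ih =>
    intro hne t
    have h1 := ih (fun v hv => hne v (List.mem_cons_of_mem _ hv)) (PySem.Str.replace t q.1 q.2)
    rw [List.foldl_cons, List.map_cons, List.foldl_cons, h1]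
    rw [PySem.Str.toList_replace,
      pvRep_eq_replace _ _ _ (fun hh => (hne q List.mem_cons_self) hh)]

-- ===== VERDICT (by name: the statement is the Claim_ definition above) =====
theorem process_emotions_spec : Claim_equal_process_emotions := by
  intro text hdom hpre
  unfold Spec_process_emotions
  apply String.toList_inj.mp
  have hA : process_emotions text =
      ([("<laugh>", "haha! "), ("<chuckle>", "hehe, "), ("<sigh>", "*sigh* "),
        ("<gasp>", "oh! "), ("<whisper>", ""), ("<excited>", ""), ("<calm>", ""),
        ("<happy>", ""), ("<sad>", "")] : List (String × String)).foldl
        (fun acc p => PySem.Str.replace acc p.1 p.2) text := rfl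
  rw [hA, pvChain_toList _ (by decide) text]
  have hmap : (([("<laugh>", "haha! "), ("<chuckle>", "hehe, "), ("<sigh>", "*sigh* "),
      ("<gasp>", "oh! "), ("<whisper>", ""), ("<excited>", ""), ("<calm>", ""),
      ("<happy>", ""), ("<sad>", "")] : List (String × String)).map
      (fun q => (q.1.toList, q.2.toList))) = pvTags := by decide
  rw [hmap, pvMain text.toList hpre]
  simp only [process_emotions_alt, String.toList_ofList]
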